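-- pv_equiv track=rewrite | github.com/GiantCroissant-Lunar/sango-card | scripts/find_multiple_types.py | find_type_end
-- ===== SOURCE A (Python) =====
-- from typing import List, Dict, Tuple
--
-- def find_type_end(lines: List[str], start_line: int) -> int:
--     """Find the closing brace of a type declaration."""
--     depth = 0
--     in_type = False
--
--     for i in range(start_line, len(lines)):
--         line = lines[i]
--
--         # Track when we enter the type body
--         if '{' in line:
--             in_type = True
--
--         if in_type:
--             depth += line.count('{')
--             depth -= line.count('}')
--
--             if depth == 0:
--                 return i
--
--     return len(lines) - 1  # Fallback to end of file
-- ===== SOURCE B (Python) =====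
-- from typing import List, Dict, Tuple
-- from itertools import accumulate
--
--
-- def find_type_end(lines: List[str], start_line: int) -> int:
--     """Find the closing brace of a type declaration.
--
--     Data-flow formulation: precompute the cumulative net-brace prefix sums
--     for the whole scanned region once, locate the opening line, and then
--     search the prefix-sum array for the first entry equal to the prefix
--     value just before the opening line (depth back to zero).
--     """
--     n = len(lines)
--     texts = [lines[i] for i in range(start_line, n)]
--     cum = list(accumulate(t.count('{') - t.count('}') for t in texts))
--     k = next((p for p, t in enumerate(texts) if '{' in t), None)
--     if k is None:
--         return n - 1
--     base = cum[k - 1] if k > 0 else 0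
--     j = next((q for q in range(k, len(texts)) if cum[q] == base), None)
--     return start_line + j if j is not None else n - 1
-- ===== Notes on version B (the rewrite author's own statement) =====
-- stated objective: alternative
-- what changed: Replaces A's single stateful loop (latched in_type flag plus running depth accumulator) by a data-flow formulation: precompute the prefix-sum array of per-line net brace counts once with itertools.accumulate, locate the opening line, then search the array for the first entry equal to the prefix value just before the opening line; same O(n) cost.
import Mathlib
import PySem

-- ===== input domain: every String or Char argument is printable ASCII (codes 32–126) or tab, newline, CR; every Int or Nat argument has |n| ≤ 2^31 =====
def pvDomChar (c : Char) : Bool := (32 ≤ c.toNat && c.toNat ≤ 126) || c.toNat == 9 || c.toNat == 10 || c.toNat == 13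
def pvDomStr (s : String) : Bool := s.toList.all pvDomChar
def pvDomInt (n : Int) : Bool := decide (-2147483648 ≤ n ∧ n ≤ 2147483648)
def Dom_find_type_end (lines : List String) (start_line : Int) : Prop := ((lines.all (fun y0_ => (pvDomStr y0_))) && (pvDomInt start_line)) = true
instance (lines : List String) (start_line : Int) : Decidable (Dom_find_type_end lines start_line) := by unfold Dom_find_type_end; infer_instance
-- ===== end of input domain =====

-- B replaces A's stateful latched depth loop by a data-flow formulation: precompute the
-- prefix-sum array of net brace counts once, then search it for the first entry equal to
-- the prefix value just before the opening line; same O(n) cost (objective: alternative).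

def pvFetch (lines : List String) (i : Int) : String := (PySem.List.pyGet? lines i).getD ""
def pvNet (t : String) : Int := (PySem.Str.count t "{" : Int) - (PySem.Str.count t "}" : Int)

-- ===== PORT A =====
def findA_go (lines : List String) (depth : Int) (in_type : Bool) : List Int → Int
  | [] => (lines.length : Int) - 1
  | i :: rest =>
    let line := pvFetch lines i
    let in_type' := in_type || PySem.Str.isIn "{" line
    if in_type' then
      let d := depth + pvNet line
      if d = 0 then i else findA_go lines d in_type' rest
    else findA_go lines depth in_type' rest

def find_type_end (lines : List String) (start_line : Int) : Int :=
  findA_go lines 0 false (PySem.List.pyRange start_line (lines.length : Int) 1)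

-- ===== PORT B =====
-- accumulate: running prefix sums
def pvCumsum (acc : Int) : List Int → List Int
  | [] => []
  | x :: xs => (acc + x) :: pvCumsum (acc + x) xs

def find_type_end_alt (lines : List String) (start_line : Int) : Int :=
  let n : Int := (lines.length : Int)
  let texts := (PySem.List.pyRange start_line n 1).map (pvFetch lines)
  let cum := pvCumsum 0 (texts.map pvNet)
  match texts.findIdx? (fun t => PySem.Str.isIn "{" t) with
  | none => n - 1
  | some k =>
    let base : Int := if 0 < k then (cum[k-1]?).getD 0 else 0
    match (cum.drop k).findIdx? (fun d => d == base) with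
    | some j => start_line + ((k + j : Nat) : Int)
    | none => n - 1

-- ===== PRECONDITION & SPEC =====
-- Pre_ excludes exactly the inputs where Python A raises IndexError: start_line < -len(lines) makes lines[start_line] out of range.
def Pre_find_type_end (lines : List String) (start_line : Int) : Prop :=
  -(lines.length : Int) ≤ start_line
instance (lines : List String) (start_line : Int) : Decidable (Pre_find_type_end lines start_line) := by unfold Pre_find_type_end; infer_instance

def pvWitness_find_type_end : List String × Int := (["type A {", "  int x;", "}"], 0)

def Spec_find_type_end (lines : List String) (start_line : Int) (out : Int) : Prop := out = find_type_end_alt lines start_line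
instance (lines : List String) (start_line : Int) (out : Int) : Decidable (Spec_find_type_end lines start_line out) := by unfold Spec_find_type_end; infer_instance

-- ===== CLAIM (what is proved, stated in full; the proofs are below) =====
def Claim_equal_find_type_end : Prop := ∀ (lines : List String) (start_line : Int), Dom_find_type_end lines start_line → Pre_find_type_end lines start_line → Spec_find_type_end lines start_line (find_type_end lines start_line)

-- ===== LEMMAS AND PROOFS =====
theorem findIdx?_lt_length {α : Type} (p : α → Bool) (l : List α) (j : Nat)
    (h : l.findIdx? p = some j) : j < l.length := by
  induction l generalizing j with
  | nil => rw [List.findIdx?_nil] at h; cases h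
  | cons x xs ih =>
    rw [List.findIdx?_cons] at h
    by_cases hp : p x = true
    · rw [if_pos hp] at h; cases h; simp
    · rw [if_neg hp] at h
      cases hx : xs.findIdx? p with
      | none => rw [hx] at h; cases h
      | some j' =>
        rw [hx] at h; simp at h; subst h
        have := ih j' hx; simp; omega

theorem pvCumsum_length (acc : Int) (xs : List Int) : (pvCumsum acc xs).length = xs.length := by
  induction xs generalizing acc with
  | nil => rfl
  | cons x xs ih => simp [pvCumsum, ih]

-- once latched with accumulator a, A's loop is the search of the prefix-sum array
-- pvCumsum (c + a) for the value c (depth back to zero)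
theorem scan_eq (lines : List String) (rest : List Int) (c a : Int) :
    findA_go lines a true rest =
      (match (pvCumsum (c + a) (rest.map (fun i => pvNet (pvFetch lines i)))).findIdx?
              (fun d => d == c) with
       | some j => (rest[j]?).getD 0
       | none => (lines.length : Int) - 1) := by
  induction rest generalizing a with
  | nil => rfl
  | cons i rest ih =>
    simp only [findA_go, Bool.true_or, if_true, List.map_cons, pvCumsum, List.findIdx?_cons]
    by_cases h : a + pvNet (pvFetch lines i) = 0
    · have : (c + a + pvNet (pvFetch lines i) == c) = true := by
        simp; omega
      simp [h, this]
    · have hp : (c + a + pvNet (pvFetch lines i) == c) = false := by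
        simp; omega
      rw [if_neg h, hp, if_neg (by simp)]
      rw [ih (a + pvNet (pvFetch lines i))]
      have harr : c + a + pvNet (pvFetch lines i) = c + (a + pvNet (pvFetch lines i)) := by ring
      rw [harr]
      cases hfi : (pvCumsum (c + (a + pvNet (pvFetch lines i)))
          (rest.map (fun i => pvNet (pvFetch lines i)))).findIdx? (fun d => d == c) with
      | none => simp
      | some j => simp

-- the unlatched phase: A skips lines up to the first opening line; B finds that line's
-- index k in texts and searches the suffix of the prefix-sum array for the base value
theorem unlatched_eq (lines : List String) (ixs : List Int) (c : Int) :
    findA_go lines 0 false ixs =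
      (match (ixs.map (pvFetch lines)).findIdx? (fun t => PySem.Str.isIn "{" t) with
       | none => (lines.length : Int) - 1
       | some k =>
         let cum := pvCumsum c (ixs.map (fun i => pvNet (pvFetch lines i)))
         let base : Int := if 0 < k then (cum[k-1]?).getD 0 else c
         match (cum.drop k).findIdx? (fun d => d == base) with
         | some j => (ixs[k+j]?).getD 0
         | none => (lines.length : Int) - 1) := by
  induction ixs generalizing c with
  | nil => rfl
  | cons i rest ih =>
    by_cases h : PySem.Str.isIn "{" (pvFetch lines i) = true
    · -- opening line: k = 0, base = c
      simp only [findA_go, Bool.false_or, h, if_true, List.map_cons, List.findIdx?_cons,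
        pvCumsum, Nat.lt_irrefl, if_false, List.drop_zero, zero_add]
      by_cases hd : pvNet (pvFetch lines i) = 0
      · have hb : ((c + pvNet (pvFetch lines i)) == c) = true := by simp [hd]
        simp [hd]
      · have hb : ((c + pvNet (pvFetch lines i)) == c) = false := by simp; omega
        rw [if_neg hd, hb, if_neg (by simp)]
        rw [scan_eq lines rest c (pvNet (pvFetch lines i))]
        cases hfi : (pvCumsum (c + pvNet (pvFetch lines i))
            (rest.map (fun i => pvNet (pvFetch lines i)))).findIdx? (fun d => d == c) with
        | none => simp
        | some j => simp
    · -- skipped line: shift k by one, fold its net count into the prefix offset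
      simp only [findA_go, Bool.false_or, h]
      rw [if_neg (by simp)]
      rw [ih (c + pvNet (pvFetch lines i))]
      simp only [List.map_cons, List.findIdx?_cons, h, pvCumsum, Bool.false_eq_true,
        if_false]
      cases hfk : (rest.map (pvFetch lines)).findIdx? (fun t => PySem.Str.isIn "{" t) with
      | none => simp
      | some k =>
        simp only [Option.map_some]
        have hsucc : (0 : Nat) < k + 1 := Nat.succ_pos k
        rw [if_pos hsucc]
        simp only [Nat.add_sub_cancel]
        cases k with
        | zero => simp [Nat.add_comm]
        | succ k' =>
          have h0 : (0 : Nat) < k' + 1 := Nat.succ_pos k'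
          rw [if_pos h0]
          simp [List.getElem?_cons]

-- elements of pyRange a b 1
theorem pyRange_getElem? (a b : Int) (p : Nat) (hp : p < ((b - a).toNat)) :
    (PySem.List.pyRange a b 1)[p]? = some (a + p) := by
  rw [PySem.List.getElem?_pyRange_one]
  simp [hp]

-- ===== VERDICT (by name: the statement is the Claim_ definition above) =====
theorem find_type_end_spec : Claim_equal_find_type_end := by
  intro lines start_line _ _
  unfold Spec_find_type_end find_type_end find_type_end_alt
  rw [unlatched_eq lines _ 0]
  simp only [List.map_map, Function.comp_def]
  cases hk : ((PySem.List.pyRange start_line (lines.length : Int) 1).map (pvFetch lines)).findIdx?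
      (fun t => PySem.Str.isIn "{" t) with
  | none => simp
  | some k =>
    simp only []
    cases hj : ((pvCumsum 0 ((PySem.List.pyRange start_line (lines.length : Int) 1).map
        (fun i => pvNet (pvFetch lines i)))).drop k).findIdx?
        (fun d => d == (if 0 < k then ((pvCumsum 0 ((PySem.List.pyRange start_line (lines.length : Int) 1).map
        (fun i => pvNet (pvFetch lines i))))[k-1]?).getD 0 else 0)) with
    | none => simp
    | some j =>
      have hjlt := findIdx?_lt_length _ _ _ hj
      have hlen : ((pvCumsum 0 ((PySem.List.pyRange start_line (lines.length : Int) 1).map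
          (fun i => pvNet (pvFetch lines i)))).drop k).length
          = ((PySem.List.pyRange start_line (lines.length : Int) 1).length - k) := by
        simp [pvCumsum_length]
      have hkj : k + j < (PySem.List.pyRange start_line (lines.length : Int) 1).length := by
        rw [hlen] at hjlt; omega
      rw [PySem.List.length_pyRange_one] at hkj
      simp only []
      rw [pyRange_getElem? _ _ _ hkj]
      simp
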